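-- pv_equiv track=rewrite | github.com/erose1337/crypto2 | crypto2/encryption.py | f
-- ===== SOURCE A (Python) =====
-- def f(X, y, q, n):
--     # operates on uncompressed vector X and compressed scalar y
--     output = 0
--     ytemp = y
--     assert isinstance(X, list), type(X)
--     for i, scalar in enumerate(X):
--         output = (output + (ytemp * scalar)) % q
--         ytemp = (ytemp * y) % q
--     return output
-- ===== SOURCE B (Python) =====
-- def f(X, y, q, n):
--     # Horner's method: result = (y * P(y)) % q with P(y) = sum X[i]*y^i,
--     # folded right-to-left instead of tracking an explicit running power.
--     assert isinstance(X, list), type(X)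
--     acc = 0
--     for scalar in reversed(X):
--         acc = (acc * y + scalar) % q
--     return (acc * y) % q
-- ===== Notes on version B (the rewrite author's own statement) =====
-- stated objective: alternative
-- what changed: Replaces the forward loop maintaining a running power y^(i+1) with Horner's method over reversed(X) maintaining a single folded accumulator (one % per element instead of two), returning (acc*y)%q.
-- outside the precondition, e.g. on f([], 5, 0, 0): A returns 0, B raises ZeroDivisionError
import Mathlib
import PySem

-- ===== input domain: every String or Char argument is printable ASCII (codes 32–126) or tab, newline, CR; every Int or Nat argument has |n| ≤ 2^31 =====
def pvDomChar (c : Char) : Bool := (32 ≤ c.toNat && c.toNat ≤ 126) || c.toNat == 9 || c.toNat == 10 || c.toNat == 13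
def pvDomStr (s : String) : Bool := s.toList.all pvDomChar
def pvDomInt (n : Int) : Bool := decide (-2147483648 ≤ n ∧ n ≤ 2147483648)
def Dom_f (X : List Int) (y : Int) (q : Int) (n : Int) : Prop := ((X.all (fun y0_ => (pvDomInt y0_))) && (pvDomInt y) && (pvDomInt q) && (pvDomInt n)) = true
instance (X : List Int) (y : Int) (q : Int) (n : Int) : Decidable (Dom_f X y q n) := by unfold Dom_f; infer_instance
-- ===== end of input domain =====

-- B replaces A's forward loop with an explicit running power by Horner's method over the
-- reversed list (alternative decomposition, same asymptotic cost).

-- ===== PORT A =====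
-- A: output=0; ytemp=y; for i, scalar in enumerate(X): output=(output+ytemp*scalar)%q; ytemp=(ytemp*y)%q
def f (X : List Int) (y : Int) (q : Int) (n : Int) : Int :=
  ((PySem.List.enumerate X).foldl
    (fun (st : Int × Int) p =>
      (PySem.Int.mod (st.1 + st.2 * p.2) q, PySem.Int.mod (st.2 * y) q))
    (0, y)).1

-- ===== PORT B =====
-- B: acc=0; for scalar in reversed(X): acc=(acc*y+scalar)%q; return (acc*y)%q
def f_alt (X : List Int) (y : Int) (q : Int) (n : Int) : Int :=
  PySem.Int.mod
    ((X.reverse.foldl (fun acc scalar => PySem.Int.mod (acc * y + scalar) q) 0) * y) q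

-- ===== PRECONDITION & SPEC =====
-- q = 0 is excluded: Python's '%' raises ZeroDivisionError there (A raises for nonempty X;
-- on empty X A returns 0 before any '%' while B's final '% q' raises).
def Pre_f (X : List Int) (y : Int) (q : Int) (n : Int) : Prop := q ≠ 0
instance (X : List Int) (y : Int) (q : Int) (n : Int) : Decidable (Pre_f X y q n) := by unfold Pre_f; infer_instance
def pvWitness_f : List Int × Int × Int × Int := ([1, 2, 3], 4, 7, 0)
def Spec_f (X : List Int) (y : Int) (q : Int) (n : Int) (out : Int) : Prop := out = f_alt X y q n
instance (X : List Int) (y : Int) (q : Int) (n : Int) (out : Int) : Decidable (Spec_f X y q n out) := by unfold Spec_f; infer_instance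

-- ===== CLAIM (what is proved, stated in full; the proofs are below) =====
def Claim_equal_f : Prop := ∀ (X : List Int) (y : Int) (q : Int) (n : Int), Dom_f X y q n → Pre_f X y q n → Spec_f X y q n (f X y q n)

-- ===== LEMMAS AND PROOFS =====

-- fmod only depends on the residue class of its first argument
theorem pv_fmod_eq_of_dvd_sub (a b q : Int) (h : q ∣ a - b) : a.fmod q = b.fmod q := by
  rw [Int.fmod_eq_emod, Int.fmod_eq_emod]
  have hm : a ≡ b [ZMOD q] := Int.modEq_iff_dvd.mpr (by simpa using (dvd_neg.mpr h))
  have h1 : a % q = b % q := hm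
  have h2 : (q ∣ a) ↔ (q ∣ b) := by
    constructor <;> intro hd
    · have := dvd_sub hd h; simpa using this
    · have := dvd_add hd h; simpa using this
  rw [h1]; simp [h2]

theorem pv_dvd_fmod_sub (a q : Int) : q ∣ a.fmod q - a := by
  refine ⟨-(a.fdiv q), ?_⟩
  have := Int.mul_fdiv_add_fmod a q
  linarith

-- the exact (un-reduced) Horner value of P(y)
def pvPoly (X : List Int) (y : Int) : Int := X.foldr (fun s acc => acc * y + s) 0

-- B's inner fold agrees with pvPoly modulo q
theorem pv_B_fold_dvd (X : List Int) (y q : Int) :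
    q ∣ (X.foldr (fun s acc => (acc * y + s).fmod q) 0) - pvPoly X y := by
  induction X with
  | nil => simp [pvPoly]
  | cons x xs ih =>
    simp only [pvPoly, List.foldr] at *
    set hb := xs.foldr (fun s acc => (acc * y + s).fmod q) 0 with hhb
    set p := xs.foldr (fun s acc => acc * y + s) 0 with hp
    have h1 := pv_dvd_fmod_sub (hb * y + x) q
    have h2 : q ∣ (hb * y + x) - (p * y + x) := by
      have : (hb * y + x) - (p * y + x) = (hb - p) * y := by ring
      rw [this]; exact Dvd.dvd.mul_right ih y
    have h4 := dvd_add h1 h2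
    have heq : (hb * y + x).fmod q - (p * y + x)
        = ((hb * y + x).fmod q - (hb * y + x)) + ((hb * y + x) - (p * y + x)) := by ring
    rw [heq]; exact h4

-- A's loop, index-free characterisation
theorem pv_A_loop (X : List Int) (y q : Int) :
    ∀ (i output ytemp : Int),
      ((PySem.List.enumerate X i).foldl
        (fun (st : Int × Int) p =>
          (PySem.Int.mod (st.1 + st.2 * p.2) q, PySem.Int.mod (st.2 * y) q))
        (output, ytemp)).1
      = if X = [] then output else (output + ytemp * pvPoly X y).fmod q := by
  induction X with
  | nil => intro i output ytemp; simp [PySem.List.enumerate_nil]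
  | cons x xs ih =>
    intro i output ytemp
    rw [PySem.List.enumerate_cons]
    simp only [List.foldl_cons, reduceCtorEq, if_false]
    rw [ih (i + 1) (PySem.Int.mod (output + ytemp * x) q) (PySem.Int.mod (ytemp * y) q)]
    by_cases hxs : xs = []
    · subst hxs
      simp [PySem.Int.mod, pvPoly]
    · simp only [hxs, if_false, PySem.Int.mod]
      apply pv_fmod_eq_of_dvd_sub
      have h1 := pv_dvd_fmod_sub (output + ytemp * x) q
      have h2 := pv_dvd_fmod_sub (ytemp * y) q
      have h3 : q ∣ ((ytemp * y).fmod q - ytemp * y) * pvPoly xs y :=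
        Dvd.dvd.mul_right h2 _
      have h4 := dvd_add h1 h3
      have heq : ((output + ytemp * x).fmod q + (ytemp * y).fmod q * pvPoly xs y) -
          (output + ytemp * pvPoly (x :: xs) y)
          = ((output + ytemp * x).fmod q - (output + ytemp * x)) +
            ((ytemp * y).fmod q - ytemp * y) * pvPoly xs y := by
        simp only [pvPoly, List.foldr]; ring
      rw [heq]; exact h4

-- ===== VERDICT (by name: the statement is the Claim_ definition above) =====
theorem f_spec : Claim_equal_f := by
  intro X y q n _ _
  unfold Spec_f f f_alt
  rw [List.foldl_reverse]
  have hB : X.foldr (fun scalar acc => PySem.Int.mod (acc * y + scalar) q) 0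
      = X.foldr (fun s acc => (acc * y + s).fmod q) 0 := by
    simp [PySem.Int.mod]
  rw [hB, pv_A_loop X y q 0 0 y]
  by_cases hX : X = []
  · subst hX; simp [PySem.Int.mod, Int.zero_fmod]
  · simp only [hX, if_false, PySem.Int.mod]
    apply pv_fmod_eq_of_dvd_sub
    have h2 := pv_B_fold_dvd X y q
    have heq : (0 + y * pvPoly X y) -
        (X.foldr (fun s acc => (acc * y + s).fmod q) 0) * y
        = -(((X.foldr (fun s acc => (acc * y + s).fmod q) 0) - pvPoly X y) * y) := by ring
    rw [heq]
    exact dvd_neg.mpr (Dvd.dvd.mul_right h2 y)
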